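-- pv_equiv track=rewrite | github.com/Lunik/adventofcode | adventofcode/solutions/y2022/d01/part1.py | parse
-- ===== SOURCE A (Python) =====
-- def parse(file):
--   elfs = []
--
--   elf = []
--   for line in file:
--     line = line.strip('\n')
--
--     if line == "":
--       elfs.append(elf)
--       elf = []
--       continue
--
--     elf.append(int(line))
--
--   elfs.append(elf)
--
--   return elfs
-- ===== SOURCE B (Python) =====
-- def parse(file):
--   lines = [l.strip('\n') for l in file]
--   groups = []
--   start = 0
--   for i, line in enumerate(lines):
--     if line == "":
--       groups.append([int(x) for x in lines[start:i]])
--       start = i + 1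
--   groups.append([int(x) for x in lines[start:]])
--   return groups
-- ===== Notes on version B (the rewrite author's own statement) =====
-- stated objective: alternative
-- what changed: Replaces A's incremental buffer-and-flush accumulation with a two-stage pass: materialize stripped lines, then split on blank-line positions by slicing lines[start:i] at each separator and lines[start:] at the end.
import Mathlib
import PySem

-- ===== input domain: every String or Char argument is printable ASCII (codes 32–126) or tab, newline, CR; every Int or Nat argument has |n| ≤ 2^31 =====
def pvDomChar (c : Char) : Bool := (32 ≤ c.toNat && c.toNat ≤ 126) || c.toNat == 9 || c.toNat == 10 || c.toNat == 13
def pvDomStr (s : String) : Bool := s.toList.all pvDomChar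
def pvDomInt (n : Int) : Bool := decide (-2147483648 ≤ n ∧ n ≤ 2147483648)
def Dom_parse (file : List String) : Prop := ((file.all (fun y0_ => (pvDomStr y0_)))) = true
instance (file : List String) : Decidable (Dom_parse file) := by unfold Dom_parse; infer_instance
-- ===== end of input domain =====

-- B replaces A's incremental buffer-and-flush with a materialize-then-slice two-stage pass (alternative decomposition, same cost).

-- shared primitive wrappers: line.strip('\n') and int(line) (Pre_ guarantees parse succeeds, so getD 0 never fires)
def stripNL (s : String) : String := PySem.Str.stripChars s "\n"
def pyInt (s : String) : Int := (PySem.Int.ofStr? s).getD 0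

-- ===== PORT A =====
-- loop body of A: flush the buffer on a blank line, else append int(line)
def fA (st : List (List Int) × List Int) (line : String) : List (List Int) × List Int :=
  if line = "" then (st.1 ++ [st.2], ([] : List Int))
  else (st.1, st.2 ++ [pyInt line])

def parse (file : List String) : List (List Int) :=
  let st := file.foldl (fun st l => fA st (stripNL l)) ([], [])
  st.1 ++ [st.2]

-- ===== PORT B =====
-- loop body of B: at each blank line, append the slice lines[start:i] (converted) and move start past it
def fB (lines : List String) (st : List (List Int) × Int) (p : Int × String) : List (List Int) × Int :=
  if p.2 = "" then (st.1 ++ [(PySem.List.slice lines (some st.2) (some p.1)).map pyInt], p.1 + 1)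
  else st

def parse_alt (file : List String) : List (List Int) :=
  let lines := file.map stripNL
  let st := (PySem.List.enumerate lines 0).foldl (fB lines) ([], 0)
  st.1 ++ [(PySem.List.slice lines (some st.2) none).map pyInt]

-- ===== PRECONDITION & SPEC =====
-- Pre_ excludes exactly the inputs where Python's int(line) raises ValueError: every stripped line must be blank or an int literal.
def Pre_parse (file : List String) : Prop :=
  ∀ l ∈ file, PySem.Str.stripChars l "\n" = "" ∨ (PySem.Int.ofStr? (PySem.Str.stripChars l "\n")).isSome
instance (file : List String) : Decidable (Pre_parse file) := by unfold Pre_parse; infer_instance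
def pvWitness_parse : List String := ["1", "2\n", "", " 3 "]

def Spec_parse (file : List String) (out : List (List Int)) : Prop := out = parse_alt file
instance (file : List String) (out : List (List Int)) : Decidable (Spec_parse file out) := by unfold Spec_parse; infer_instance

-- ===== CLAIM (what is proved, stated in full; the proofs are below) =====
def Claim_equal_parse : Prop := ∀ (file : List String), Dom_parse file → Pre_parse file → Spec_parse file (parse file)

-- ===== LEMMAS AND PROOFS =====

-- Invariant: processing the suffix lines.drop i, A's buffer is exactly the (converted) pending slice lines[start:i],
-- and both folds finish with the same full output.
lemma parse_loop_eq (suf : List String) : ∀ (lines : List String) (i start : Nat)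
    (gs : List (List Int)), lines.drop i = suf → start ≤ i →
    (let r := suf.foldl fA (gs, ((lines.drop start).take (i - start)).map pyInt)
     r.1 ++ [r.2]) =
    (let rb := (PySem.List.enumerate suf (i : Int)).foldl (fB lines) (gs, (start : Int))
     rb.1 ++ [(PySem.List.slice lines (some rb.2) none).map pyInt]) := by
  induction suf with
  | nil =>
    intro lines i start gs hdrop hle
    have hlen : lines.length ≤ i := by
      have := List.drop_eq_nil_iff.mp hdrop; omega
    simp only [List.foldl_nil, PySem.List.enumerate_nil]
    rw [PySem.List.slice_from_natCast]
    have : (lines.drop start).take (i - start) = lines.drop start := by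
      apply List.take_of_length_le; simp; omega
    rw [this]
  | cons l rest ih =>
    intro lines i start gs hdrop hle
    have hi : i < lines.length := by
      by_contra h
      have : lines.drop i = [] := List.drop_eq_nil_iff.mpr (by omega)
      rw [this] at hdrop; exact List.cons_ne_nil l rest hdrop.symm
    have hdrop' : lines.drop (i + 1) = rest := by
      rw [← List.drop_drop, hdrop]; rfl
    have hget : lines[i]? = some l := by
      have h0 : (lines.drop i)[0]? = lines[i]? := by
        rw [List.getElem?_drop]; norm_num
      rw [hdrop] at h0; simpa using h0.symm
    rw [PySem.List.enumerate_cons]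
    simp only [List.foldl_cons]
    by_cases hl : l = ""
    · -- blank line: A flushes the buffer, B appends the slice and advances start
      have hslice : PySem.List.slice lines (some (start : Int)) (some (i : Int)) =
          (lines.drop start).take (i - start) := PySem.List.slice_natCast lines start i
      simp only [fA, fB, hl, if_pos, hslice]
      have := ih lines (i + 1) (i + 1) (gs ++ [((lines.drop start).take (i - start)).map pyInt])
        hdrop' (le_refl _)
      simpa [Nat.sub_self] using this
    · -- non-blank line: A extends the buffer with int(l), B's state is unchanged
      simp only [fA, fB, if_neg hl]
      have hext : ((lines.drop start).take (i + 1 - start)).map pyInt =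
          ((lines.drop start).take (i - start)).map pyInt ++ [pyInt l] := by
        have h1 : i + 1 - start = (i - start) + 1 := by omega
        have h2 : (lines.drop start)[i - start]? = some l := by
          rw [List.getElem?_drop]
          have : start + (i - start) = i := by omega
          rw [this, hget]
        rw [h1, List.take_add_one, h2]
        simp
      have := ih lines (i + 1) start (gs) hdrop' (by omega)
      rw [hext] at this
      push_cast at this
      simpa using this
  
theorem parse_eq_alt (file : List String) : parse file = parse_alt file := by
  unfold parse parse_alt
  rw [← List.foldl_map (f := stripNL) (g := fA)]
  have := parse_loop_eq (file.map stripNL) (file.map stripNL) 0 0 [] (by simp) (le_refl 0)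
  simpa using this

-- ===== VERDICT (by name: the statement is the Claim_ definition above) =====
theorem parse_spec : Claim_equal_parse := by
  intro file _ _
  unfold Spec_parse
  exact parse_eq_alt file
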